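-- pv_equiv track=rewrite | github.com/barumau/pandunia | bin/reorder_morphology.py | reorder_morphemes
-- ===== SOURCE A (Python) =====
-- def reorder_morphemes(word):
--     """Reorders for example <dut!pro!para.ion.al.ism:e> into <para.pro.dut·ion·al·ism'e>. """
--     morphemes = word.replace("!", ",!").replace(".t.", ".t").replace(".", ",·").replace(":", ",'").split(',')
--     reordered = ""
--     for morpheme in morphemes:
--         if "!" in morpheme:
--             # The old way was to mark prefixes with prefixed <!>.
--             # Insert prefix before the rest and mark it with suffixed <.>.
--             reordered = morpheme.replace("!", "") + "." + reordered
--         else: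
--             # Insert suffixes and endings after the rest.
--             # Prefix suffixes with <·> and the ending with <'>.
--             reordered = reordered + morpheme
--
--     if word != "" and reordered[-1] == "·":
--         # Slice off the character <·> that is at the end of the word.
--         reordered = reordered[:-1]
--
--     return reordered.replace("' ", " ").replace("· ", " ")
-- ===== SOURCE B (Python) =====
-- def reorder_morphemes(word):
--     """Single character scan: after contracting '.t.' to '.t', walk the word once,
--     treating ',', '!', '.' and ':' as morpheme boundaries ('!' opens a prefix
--     morpheme, '.' opens a suffix morpheme marked '·', ':' an ending marked "'"),
--     collecting prefixes and the body directly; assemble reversed dotted prefixes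
--     plus the body, trim a trailing '·', and drop marker chars standing before a space."""
--     s = word.replace(".t.", ".t")
--     prefixes = []
--     body = []
--     cur = []
--
--     def flush():
--         if cur and cur[0] == '!':
--             prefixes.append(''.join(cur[1:]))
--         else:
--             body.extend(cur)
--
--     for c in s:
--         if c == ',':
--             flush()
--             cur = []
--         elif c == '!':
--             flush()
--             cur = ['!']
--         elif c == '.':
--             flush()
--             cur = ['\u00b7']
--         elif c == ':':
--             flush()
--             cur = ["'"]
--         else:
--             cur.append(c)
--     flush()
--
--     reordered = ''.join(p + '.' for p in reversed(prefixes)) + ''.join(body)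
--     if reordered.endswith('\u00b7'):
--         reordered = reordered[:-1]
--
--     def drop_before_space(t, ch):
--         return ''.join(c for i, c in enumerate(t)
--                        if not (c == ch and i + 1 < len(t) and t[i + 1] == ' '))
--
--     return drop_before_space(drop_before_space(reordered, "'"), '\u00b7')
-- ===== Notes on version B (the rewrite author's own statement) =====
-- stated objective: alternative
-- what changed: B drops A's four-stage replace chain, split and string-fold entirely: after the single '.t.'->'.t' contraction it walks the word once with a fused scanner that treats ',', '!', '.', ':' as morpheme boundaries, partitioning directly into a prefix list and a body, assembles reversed dotted prefixes plus body, and replaces the two final 'marker+space' replaces by one deletion scan per marker.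
import Mathlib
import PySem

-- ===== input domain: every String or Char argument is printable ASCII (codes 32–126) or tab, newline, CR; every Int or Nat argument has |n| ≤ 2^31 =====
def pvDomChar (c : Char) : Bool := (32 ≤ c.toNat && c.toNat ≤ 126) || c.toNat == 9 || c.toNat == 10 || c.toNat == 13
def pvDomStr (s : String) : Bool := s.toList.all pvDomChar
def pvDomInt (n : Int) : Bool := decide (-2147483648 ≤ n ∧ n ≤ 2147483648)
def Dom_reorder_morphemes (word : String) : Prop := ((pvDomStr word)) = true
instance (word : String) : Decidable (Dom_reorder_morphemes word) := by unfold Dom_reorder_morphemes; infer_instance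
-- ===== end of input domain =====

-- B replaces A's replace-chain + split + string-fold pipeline by one fused character scan
-- that recognises the morpheme boundaries directly (alternative decomposition; no speed claim).

-- ===== PORT A =====
def reorder_morphemes (word : String) : String :=
  let morphemes := PySem.Chars.splitOn
    (PySem.Chars.replace
      (PySem.Chars.replace
        (PySem.Chars.replace
          (PySem.Chars.replace word.toList ['!'] [',', '!'])
          ['.', 't', '.'] ['.', 't'])
        ['.'] [',', '·'])
      [':'] [',', '\''])
    [',']
  let reordered := morphemes.foldl
    (fun reordered morpheme =>
      if PySem.Chars.isIn ['!'] morpheme then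
        PySem.Chars.replace morpheme ['!'] [] ++ ['.'] ++ reordered
      else
        reordered ++ morpheme) []
  -- Python's reordered[-1] raises on empty reordered; Pre_ excludes that case, default is arbitrary
  let reordered :=
    if word.toList ≠ [] ∧ PySem.List.pyGetD reordered (-1) ' ' = '·' then
      PySem.List.slice reordered none (some (-1))
    else reordered
  String.ofList (PySem.Chars.replace (PySem.Chars.replace reordered ['\'', ' '] [' ']) ['·', ' '] [' '])

-- ===== PORT B =====
-- flush(): close the current morpheme; a '!'-headed one becomes a prefix, the rest joins the body
def pvFlushB (cur : List Char) (ps : List (List Char)) (body : List Char) :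
    List (List Char) × List Char :=
  if cur.head? = some '!' then (ps ++ [cur.tail], body) else (ps, body ++ cur)

-- the single scan of Source B: ',' '!' '.' ':' are morpheme boundaries, everything else extends cur
def pvScanB : List Char → List Char → List (List Char) → List Char → List (List Char) × List Char
  | [], cur, ps, body => pvFlushB cur ps body
  | c :: rest, cur, ps, body =>
    if c = ',' then
      pvScanB rest [] (pvFlushB cur ps body).1 (pvFlushB cur ps body).2
    else if c = '!' then
      pvScanB rest ['!'] (pvFlushB cur ps body).1 (pvFlushB cur ps body).2
    else if c = '.' then
      pvScanB rest ['·'] (pvFlushB cur ps body).1 (pvFlushB cur ps body).2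
    else if c = ':' then
      pvScanB rest ['\''] (pvFlushB cur ps body).1 (pvFlushB cur ps body).2
    else
      pvScanB rest (cur ++ [c]) ps body

-- drop_before_space(t, ch) of Source B: delete ch wherever the next character is a space
def pvDropB (ch : Char) : List Char → List Char
  | [] => []
  | c :: rest =>
    if c = ch ∧ rest.head? = some ' ' then pvDropB ch rest else c :: pvDropB ch rest

def reorder_morphemes_alt (word : String) : String :=
  let s := PySem.Chars.replace word.toList ['.', 't', '.'] ['.', 't']
  let pr := pvScanB s [] [] []
  let reordered := (pr.1.reverse.map (fun p => p ++ ['.'])).flatten ++ pr.2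
  let reordered :=
    if PySem.Chars.endswith reordered ['·'] then
      PySem.List.slice reordered none (some (-1))
    else reordered
  String.ofList (pvDropB '·' (pvDropB '\'' reordered))

-- ===== PRECONDITION & SPEC =====
-- Pre_ excludes exactly the inputs where Python raises IndexError: a nonempty word made
-- entirely of commas leaves reordered empty, so reordered[-1] raises in A.
def Pre_reorder_morphemes (word : String) : Prop :=
  word = "" ∨ word.toList.any (fun c => c ≠ ',') = true
instance (word : String) : Decidable (Pre_reorder_morphemes word) := by
  unfold Pre_reorder_morphemes; infer_instance

def pvWitness_reorder_morphemes : String := "dut!pro!para.ion.al.ism:e"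

def Spec_reorder_morphemes (word : String) (out : String) : Prop := out = reorder_morphemes_alt word
instance (word : String) (out : String) : Decidable (Spec_reorder_morphemes word out) := by
  unfold Spec_reorder_morphemes; infer_instance

-- ===== CLAIM (what is proved, stated in full; the proofs are below) =====
def Claim_equal_reorder_morphemes : Prop :=
  ∀ (word : String), Dom_reorder_morphemes word → Pre_reorder_morphemes word →
    Spec_reorder_morphemes word (reorder_morphemes word)

-- ===== LEMMAS AND PROOFS =====

theorem pvRepGoAcc (old new : List Char) :
    ∀ fuel l acc, PySem.Chars.replace.go old new fuel l acc =
      acc.reverse ++ PySem.Chars.replace.go old new fuel l [] := by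
  intro fuel
  induction fuel with
  | zero => intro l acc; rw [PySem.Chars.replace.go.eq_def, PySem.Chars.replace.go.eq_def]; simp
  | succ f ih =>
    intro l acc
    cases l with
    | nil => rw [PySem.Chars.replace.go.eq_def, PySem.Chars.replace.go.eq_def]; simp
    | cons c t =>
      rw [PySem.Chars.replace.go.eq_def]
      conv_rhs => rw [PySem.Chars.replace.go.eq_def]
      by_cases hp : old.isPrefixOf (c :: t) = true
      · simp only [hp, if_true]
        rw [ih _ (new.reverse ++ acc), ih _ (new.reverse ++ [])]
        simp
      · simp only [hp, if_false, Bool.false_eq_true]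
        rw [ih t (c :: acc), ih t (c :: [])]
        simp

theorem pvRepGoFuel (old new : List Char) (hold : old ≠ []) :
    ∀ n l fuel₁ fuel₂ acc, l.length ≤ n → l.length ≤ fuel₁ → l.length ≤ fuel₂ →
      PySem.Chars.replace.go old new fuel₁ l acc = PySem.Chars.replace.go old new fuel₂ l acc := by
  intro n
  induction n with
  | zero =>
    intro l fuel₁ fuel₂ acc h0 h1 h2
    have : l = [] := by
      cases l with
      | nil => rfl
      | cons c t => simp at h0
    subst this
    cases fuel₁ <;> cases fuel₂ <;> simp [PySem.Chars.replace.go.eq_def]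
  | succ n ih =>
    intro l fuel₁ fuel₂ acc h0 h1 h2
    cases l with
    | nil =>
      cases fuel₁ <;> cases fuel₂ <;> simp [PySem.Chars.replace.go.eq_def]
    | cons c t =>
      obtain ⟨f₁, rfl⟩ : ∃ f, fuel₁ = f + 1 := by
        cases fuel₁ with
        | zero => simp at h1
        | succ f => exact ⟨f, rfl⟩
      obtain ⟨f₂, rfl⟩ : ∃ f, fuel₂ = f + 1 := by
        cases fuel₂ with
        | zero => simp at h2
        | succ f => exact ⟨f, rfl⟩
      rw [PySem.Chars.replace.go.eq_def]
      conv_rhs => rw [PySem.Chars.replace.go.eq_def]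
      have h1' : 1 ≤ old.length := by
        cases old with
        | nil => exact absurd rfl hold
        | cons _ _ => simp
      simp only [List.length_cons] at h0 h1 h2
      by_cases hp : old.isPrefixOf (c :: t) = true
      · simp only [hp, if_true]
        apply ih <;> simp only [List.length_drop, List.length_cons] <;> omega
      · simp only [hp, if_false, Bool.false_eq_true]
        apply ih <;> omega

theorem pvRep_nil (old new : List Char) (h : old ≠ []) :
    PySem.Chars.replace [] old new = [] := by
  unfold PySem.Chars.replace
  have : old.isEmpty = false := by cases old <;> simp_all
  rw [this]
  simp [PySem.Chars.replace.go.eq_def]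

theorem pvRep_pos (old new l : List Char) (h : old ≠ []) (hp : old.isPrefixOf l = true) :
    PySem.Chars.replace l old new = new ++ PySem.Chars.replace (l.drop old.length) old new := by
  have hE : old.isEmpty = false := by cases old <;> simp_all
  have h1 : 1 ≤ old.length := by cases old with
    | nil => exact absurd rfl h
    | cons _ _ => simp
  have hle : old.length ≤ l.length := (List.isPrefixOf_iff_prefix.mp hp).length_le
  obtain ⟨c, t, rfl⟩ : ∃ c t, l = c :: t := by
    cases l with
    | nil => exfalso; simp at hle; exact h hle
    | cons c t => exact ⟨c, t, rfl⟩
  unfold PySem.Chars.replace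
  rw [hE]
  simp only [Bool.false_eq_true, if_false]
  rw [PySem.Chars.replace.go.eq_def]
  simp only [List.length_cons, hp, if_true]
  rw [pvRepGoAcc]
  have := pvRepGoFuel old new h (List.drop old.length (c :: t)).length
      (List.drop old.length (c :: t)) t.length (List.drop old.length (c :: t)).length []
      (le_refl _) (by simp; omega) (le_refl _)
  rw [this]
  simp

theorem pvRep_neg (old new : List Char) (c : Char) (t : List Char) (h : old ≠ [])
    (hn : old.isPrefixOf (c :: t) = false) :
    PySem.Chars.replace (c :: t) old new = c :: PySem.Chars.replace t old new := by
  have hE : old.isEmpty = false := by cases old <;> simp_all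
  unfold PySem.Chars.replace
  rw [hE]
  simp only [Bool.false_eq_true, if_false]
  rw [PySem.Chars.replace.go.eq_def]
  simp only [List.length_cons, hn, Bool.false_eq_true, if_false]
  rw [pvRepGoAcc]
  simp

theorem pvRep_single (a : Char) (r : List Char) :
    ∀ l, PySem.Chars.replace l [a] r = l.flatMap (fun c => if c = a then r else [c]) := by
  intro l
  induction l with
  | nil => rw [pvRep_nil _ _ (by simp)]; simp
  | cons c t ih =>
    by_cases hc : c = a
    · rw [pvRep_pos [a] r (c :: t) (by simp) (by simp [List.isPrefixOf, hc])]
      simp [hc, ih]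
    · rw [pvRep_neg [a] r c t (by simp)
        (by simp only [List.isPrefixOf, Bool.and_eq_false_iff]; left; simp [beq_eq_false_iff_ne]; exact fun h => hc h.symm)]
      simp [hc, ih]

def pvMySplit : List Char → List (List Char)
  | [] => [[]]
  | c :: t =>
    if c = ',' then [] :: pvMySplit t
    else
      match pvMySplit t with
      | [] => [[c]]
      | m :: ms => (c :: m) :: ms

def pvConsHead (cur : List Char) : List (List Char) → List (List Char)
  | [] => [cur]
  | m :: ms => (cur ++ m) :: ms

theorem pvMySplit_ne_nil (s : List Char) : pvMySplit s ≠ [] := by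
  cases s with
  | nil => simp [pvMySplit]
  | cons c t =>
    simp only [pvMySplit]
    split
    · simp
    · split <;> simp

theorem pvSplitGo (s : List Char) :
    ∀ fuel cur acc, s.length ≤ fuel →
      PySem.Chars.splitOn.go [','] fuel s cur acc =
        acc.reverse ++ pvConsHead cur.reverse (pvMySplit s) := by
  induction s with
  | nil =>
    intro fuel cur acc h
    cases fuel <;> simp [PySem.Chars.splitOn.go.eq_def, pvMySplit, pvConsHead]
  | cons c t ih =>
    intro fuel cur acc h
    obtain ⟨f, rfl⟩ : ∃ f, fuel = f + 1 := by
      cases fuel with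
      | zero => simp at h
      | succ f => exact ⟨f, rfl⟩
    rw [PySem.Chars.splitOn.go.eq_def]
    simp only []
    by_cases hc : c = ','
    · have hp : List.isPrefixOf [','] (c :: t) = true := by simp [List.isPrefixOf, hc]
      simp only [hp, if_true, List.length_cons, List.drop_succ_cons]
      norm_num
      rw [ih f [] (cur.reverse :: acc) (by simp at h ⊢; omega)]
      subst hc
      simp [pvMySplit, pvConsHead]
      cases hM : pvMySplit t with
      | nil => exact absurd hM (pvMySplit_ne_nil t)
      | cons m ms => simp [pvConsHead]
    · have hp : List.isPrefixOf [','] (c :: t) = false := by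
        simp only [List.isPrefixOf, Bool.and_eq_false_iff]; left
        simp [beq_eq_false_iff_ne]; exact fun h' => hc h'.symm
      simp only [hp, Bool.false_eq_true, if_false]
      rw [ih f (c :: cur) acc (by simp at h ⊢; omega)]
      simp only [pvMySplit, hc, if_false]
      cases hM : pvMySplit t with
      | nil => exact absurd hM (pvMySplit_ne_nil t)
      | cons m ms => simp [pvConsHead]

theorem pvSplit_eq (s : List Char) : PySem.Chars.splitOn s [','] = pvMySplit s := by
  unfold PySem.Chars.splitOn
  rw [pvSplitGo s (s.length + 1) [] [] (by omega)]
  cases hM : pvMySplit s with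
  | nil => exact absurd hM (pvMySplit_ne_nil s)
  | cons m ms => simp [pvConsHead]

def pvE1 (c : Char) : List Char := if c = '!' then [',', '!'] else [c]

def pvE (c : Char) : List Char :=
  if c = '!' then [',', '!']
  else if c = '.' then [',', '·']
  else if c = ':' then [',', '\'']
  else [c]

theorem pvPrefixT (t : List Char) :
    List.isPrefixOf ['t', '.'] (t.flatMap pvE1) = List.isPrefixOf ['t', '.'] t := by
  cases t with
  | nil => simp
  | cons d t' =>
    by_cases hd : d = '!'
    · subst hd
      simp [pvE1, List.isPrefixOf]
    · simp only [List.flatMap_cons, pvE1, hd, if_false]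
      simp only [List.singleton_append, List.isPrefixOf]
      by_cases hdt : d = 't'
      · subst hdt
        simp only [beq_self_eq_true, Bool.true_and]
        cases t' with
        | nil => simp
        | cons e t'' =>
          by_cases he : e = '!'
          · subst he; simp [pvE1, List.isPrefixOf]
          · simp [pvE1, he, List.isPrefixOf]
      · simp [hdt, show ('t' == d) = false by simp [beq_eq_false_iff_ne]; exact fun h => hdt h.symm]

theorem pvComm (w : List Char) :
    PySem.Chars.replace (w.flatMap pvE1) ['.', 't', '.'] ['.', 't'] =
      (PySem.Chars.replace w ['.', 't', '.'] ['.', 't']).flatMap pvE1 := by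
  induction hn : w.length using Nat.strong_induction_on generalizing w with
  | _ n ih =>
  subst hn
  cases w with
  | nil => rw [pvRep_nil _ _ (by simp)]; simp [pvRep_nil _ _ (by simp : ['.','t','.'] ≠ [])]
  | cons c t =>
    by_cases hm : List.isPrefixOf ['.', 't', '.'] (c :: t) = true
    · obtain ⟨c2, c3, w3, rfl, rfl, rfl, rfl⟩ :
          ∃ c2 c3 w3, t = c2 :: c3 :: w3 ∧ c = '.' ∧ c2 = 't' ∧ c3 = '.' := by
        cases t with
        | nil => simp [List.isPrefixOf] at hm
        | cons c2 t2 =>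
          cases t2 with
          | nil => simp [List.isPrefixOf] at hm
          | cons c3 w3 =>
            simp [List.isPrefixOf] at hm
            exact ⟨c2, c3, w3, rfl, hm.1.symm, hm.2.1.symm, hm.2.2.symm⟩
      have hfm : (('.' :: 't' :: '.' :: w3).flatMap pvE1) =
          '.' :: 't' :: '.' :: (w3.flatMap pvE1) := by simp [pvE1]
      rw [hfm]
      rw [pvRep_pos ['.', 't', '.'] ['.', 't'] ('.' :: 't' :: '.' :: (w3.flatMap pvE1))
        (by simp) (by simp [List.isPrefixOf])]
      rw [pvRep_pos ['.', 't', '.'] ['.', 't'] ('.' :: 't' :: '.' :: w3)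
        (by simp) (by simp [List.isPrefixOf])]
      simp only [List.length_cons, List.drop_succ_cons]
      norm_num
      rw [ih w3.length (by simp; omega) w3 rfl]
      simp [pvE1]
    · have hm0 : List.isPrefixOf ['.', 't', '.'] (c :: t) = false :=
        Bool.eq_false_iff.mpr hm
      by_cases hc : c = '!'
      · subst hc
        have hfm : (('!' :: t).flatMap pvE1) = ',' :: '!' :: (t.flatMap pvE1) := by
          simp [pvE1]
        rw [hfm]
        rw [pvRep_neg ['.', 't', '.'] ['.', 't'] ',' ('!' :: t.flatMap pvE1)
          (by simp) (by simp [List.isPrefixOf])]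
        rw [pvRep_neg ['.', 't', '.'] ['.', 't'] '!' (t.flatMap pvE1)
          (by simp) (by simp [List.isPrefixOf])]
        rw [ih t.length (by simp) t rfl]
        rw [pvRep_neg ['.', 't', '.'] ['.', 't'] '!' t (by simp) hm0]
        simp [pvE1]
      · have hfm : ((c :: t).flatMap pvE1) = c :: (t.flatMap pvE1) := by
          simp [pvE1, hc]
        rw [hfm]
        have hm' : List.isPrefixOf ['.', 't', '.'] (c :: t.flatMap pvE1) = false := by
          simp only [List.isPrefixOf, Bool.and_eq_false_iff]
          by_cases hcd : c = '.'
          · right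
            rw [pvPrefixT]
            simp only [List.isPrefixOf, Bool.and_eq_false_iff] at hm0
            rcases hm0 with hm0 | hm0
            · exfalso; simp [hcd] at hm0
            · exact hm0
          · left; simp [beq_eq_false_iff_ne]; exact fun h => hcd h.symm
        rw [pvRep_neg ['.', 't', '.'] ['.', 't'] c (t.flatMap pvE1) (by simp) hm']
        rw [ih t.length (by simp) t rfl]
        rw [pvRep_neg ['.', 't', '.'] ['.', 't'] c t (by simp) hm0]
        simp [pvE1, hc]

theorem pvEcomp (l : List Char) :
    List.flatMap (fun c => if c = ':' then [',', '\''] else [c])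
      (List.flatMap (fun c => if c = '.' then [',', '·'] else [c])
        (List.flatMap pvE1 l)) = List.flatMap pvE l := by
  induction l with
  | nil => rfl
  | cons c t ih =>
    simp only [List.flatMap_cons, List.flatMap_append]
    rw [ih]
    congr 1
    by_cases h1 : c = '!'
    · subst h1; simp [pvE1, pvE]
    · by_cases h2 : c = '.'
      · subst h2; simp [pvE1, pvE]
      · by_cases h3 : c = ':'
        · subst h3; simp [pvE1, pvE]
        · simp [pvE1, pvE, h1, h2, h3]

theorem pvChain (w : List Char) :
    PySem.Chars.replace
      (PySem.Chars.replace
        (PySem.Chars.replace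
          (PySem.Chars.replace w ['!'] [',', '!'])
          ['.', 't', '.'] ['.', 't'])
        ['.'] [',', '·'])
      [':'] [',', '\''] =
    (PySem.Chars.replace w ['.', 't', '.'] ['.', 't']).flatMap pvE := by
  rw [pvRep_single '!' [',', '!'] w]
  have h1 : w.flatMap (fun c => if c = '!' then [',', '!'] else [c]) = w.flatMap pvE1 := rfl
  rw [h1, pvComm w]
  rw [pvRep_single '.' [',', '·'], pvRep_single ':' [',', '\'']]
  exact pvEcomp _

theorem pvIsInSingleton (a : Char) (l : List Char) :
    PySem.Chars.isIn [a] l = true ↔ a ∈ l := by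
  rw [PySem.Chars.isIn_iff_infix]
  exact List.singleton_infix_iff a l

def pvAssemble (pr : List (List Char) × List Char) : List Char :=
  (pr.1.reverse.map (fun p => p ++ ['.'])).flatten ++ pr.2

def pvPartA (ms : List (List Char)) (ps : List (List Char)) (body : List Char) :
    List (List Char) × List Char :=
  ms.foldl
    (fun acc m =>
      if PySem.Chars.isIn ['!'] m then (acc.1 ++ [PySem.Chars.replace m ['!'] []], acc.2)
      else (acc.1, acc.2 ++ m)) (ps, body)

theorem pvAfold (ms : List (List Char)) :
    ∀ ps body,
      ms.foldl
        (fun reordered morpheme =>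
          if PySem.Chars.isIn ['!'] morpheme then
            PySem.Chars.replace morpheme ['!'] [] ++ ['.'] ++ reordered
          else
            reordered ++ morpheme) (pvAssemble (ps, body)) =
      pvAssemble (pvPartA ms ps body) := by
  induction ms with
  | nil => intro ps body; rfl
  | cons m t ih =>
    intro ps body
    simp only [List.foldl_cons, pvPartA]
    by_cases h : PySem.Chars.isIn ['!'] m = true
    · simp only [h, if_true]
      have : PySem.Chars.replace m ['!'] [] ++ ['.'] ++ pvAssemble (ps, body) =
          pvAssemble (ps ++ [PySem.Chars.replace m ['!'] []], body) := by
        simp [pvAssemble, List.reverse_append]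
      rw [this]
      exact ih _ _
    · simp only [h, if_false, Bool.false_eq_true]
      have : pvAssemble (ps, body) ++ m = pvAssemble (ps, body ++ m) := by
        simp [pvAssemble]
      rw [this]
      exact ih _ _

theorem pvFlatMapNoBang (t : List Char) (h : '!' ∉ t) :
    t.flatMap (fun c => if c = '!' then [] else [c]) = t := by
  induction t with
  | nil => rfl
  | cons y u ih =>
    simp only [List.mem_cons, not_or] at h
    simp only [List.flatMap_cons, if_neg (fun hy : y = '!' => h.1 hy.symm), List.singleton_append, ih h.2]

theorem pvFlush_eq (cur : List Char) (ps : List (List Char)) (body : List Char)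
    (h : '!' ∉ cur.tail) :
    (if PySem.Chars.isIn ['!'] cur then (ps ++ [PySem.Chars.replace cur ['!'] []], body)
     else (ps, body ++ cur)) = pvFlushB cur ps body := by
  cases cur with
  | nil =>
    simp [pvFlushB, show PySem.Chars.isIn ['!'] [] = false by decide]
  | cons x t =>
    by_cases hx : x = '!'
    · subst hx
      have hin : PySem.Chars.isIn ['!'] ('!' :: t) = true := (pvIsInSingleton _ _).mpr (by simp)
      simp only [hin, if_true, pvFlushB, List.head?_cons, List.tail_cons, if_pos rfl]
      congr 2
      rw [pvRep_single]
      simp only [List.tail_cons] at h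
      simp [pvFlatMapNoBang t h]
    · have hin : PySem.Chars.isIn ['!'] (x :: t) = false := by
        rw [Bool.eq_false_iff]
        intro hc
        rcases (pvIsInSingleton _ _).mp hc with h1
        simp only [List.mem_cons] at h1
        rcases h1 with h1 | h1
        · exact hx h1.symm
        · exact h (by simpa using h1)
      simp only [hin, Bool.false_eq_true, if_false, pvFlushB, List.head?_cons]
      rw [if_neg (by simpa using fun hh : x = '!' => hx hh)]

theorem pvPartA_cons (m : List Char) (ms : List (List Char)) (ps : List (List Char))
    (body : List Char) :
    pvPartA (m :: ms) ps body =
      pvPartA ms (if PySem.Chars.isIn ['!'] m then (ps ++ [PySem.Chars.replace m ['!'] []], body)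
        else (ps, body ++ m)).1
        (if PySem.Chars.isIn ['!'] m then (ps ++ [PySem.Chars.replace m ['!'] []], body)
        else (ps, body ++ m)).2 := by
  simp only [pvPartA, List.foldl_cons]

theorem pvMySplit_comma (t : List Char) : pvMySplit (',' :: t) = [] :: pvMySplit t := by
  simp [pvMySplit]

theorem pvMySplit_cons (c : Char) (t : List Char) (hc : ¬ c = ',') (m : List Char)
    (ms : List (List Char)) (hM : pvMySplit t = m :: ms) :
    pvMySplit (c :: t) = (c :: m) :: ms := by
  simp [pvMySplit, hc, hM]

theorem pvConsHead_cons (cur m : List Char) (ms : List (List Char)) :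
    pvConsHead cur (m :: ms) = (cur ++ m) :: ms := rfl

theorem pvMain (s : List Char) :
    ∀ cur ps body, '!' ∉ cur.tail →
      pvPartA (pvConsHead cur (pvMySplit (s.flatMap pvE))) ps body = pvScanB s cur ps body := by
  induction s with
  | nil =>
    intro cur ps body h
    show pvPartA (pvConsHead cur [[]]) ps body = pvFlushB cur ps body
    rw [pvConsHead_cons, List.append_nil, pvPartA_cons, pvFlush_eq cur ps body h]
    simp [pvPartA]
  | cons c s' ih =>
    intro cur ps body h
    obtain ⟨m, ms, hM⟩ : ∃ m ms, pvMySplit (s'.flatMap pvE) = m :: ms := by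
      cases hM : pvMySplit (s'.flatMap pvE) with
      | nil => exact absurd hM (pvMySplit_ne_nil _)
      | cons m ms => exact ⟨m, ms, rfl⟩
    by_cases hc1 : c = ','
    · subst hc1
      rw [List.flatMap_cons, show pvE ',' = [','] from by decide, List.singleton_append,
        pvMySplit_comma, pvConsHead_cons, List.append_nil, pvPartA_cons,
        pvFlush_eq cur ps body h]
      simp only [pvScanB, if_pos rfl]
      rw [← ih [] _ _ (by simp), hM, pvConsHead_cons, List.nil_append]
      simp
    · by_cases hc2 : c = '!'
      · subst hc2
        rw [List.flatMap_cons, show pvE '!' = [',', '!'] from by decide]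
        rw [show ([',', '!'] : List Char) ++ s'.flatMap pvE = ',' :: '!' :: s'.flatMap pvE from rfl]
        rw [pvMySplit_comma, pvMySplit_cons '!' _ (by decide) m ms hM,
          pvConsHead_cons, List.append_nil, pvPartA_cons, pvFlush_eq cur ps body h]
        simp only [pvScanB, reduceIte]
        rw [← ih ['!'] _ _ (by simp), hM, pvConsHead_cons, List.singleton_append]
        simp
      · by_cases hc3 : c = '.'
        · subst hc3
          rw [List.flatMap_cons, show pvE '.' = [',', '·'] from by decide]
          rw [show ([',', '·'] : List Char) ++ s'.flatMap pvE = ',' :: '·' :: s'.flatMap pvE from rfl]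
          rw [pvMySplit_comma, pvMySplit_cons '·' _ (by decide) m ms hM,
            pvConsHead_cons, List.append_nil, pvPartA_cons, pvFlush_eq cur ps body h]
          simp only [pvScanB, reduceIte]
          rw [← ih ['·'] _ _ (by simp), hM, pvConsHead_cons, List.singleton_append]
          simp
        · by_cases hc4 : c = ':'
          · subst hc4
            rw [List.flatMap_cons, show pvE ':' = [',', '\''] from by decide]
            rw [show ([',', '\''] : List Char) ++ s'.flatMap pvE = ',' :: '\'' :: s'.flatMap pvE from rfl]
            rw [pvMySplit_comma, pvMySplit_cons '\'' _ (by decide) m ms hM,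
              pvConsHead_cons, List.append_nil, pvPartA_cons, pvFlush_eq cur ps body h]
            simp only [pvScanB, reduceIte]
            rw [← ih ['\''] _ _ (by simp), hM, pvConsHead_cons, List.singleton_append]
            simp
          · have hE : pvE c = [c] := by simp [pvE, hc2, hc3, hc4]
            rw [List.flatMap_cons, hE, List.singleton_append,
              pvMySplit_cons c _ hc1 m ms hM, pvConsHead_cons]
            simp only [pvScanB, if_neg hc1, if_neg hc2, if_neg hc3, if_neg hc4]
            rw [← ih (cur ++ [c]) _ _ ?_, hM, pvConsHead_cons, List.append_assoc,
              List.singleton_append]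
            cases cur with
            | nil => simp
            | cons x t =>
              simp only [List.tail_cons] at h
              simp only [List.cons_append, List.tail_cons]
              simp only [List.mem_append, not_or]
              exact ⟨h, by simp [hc2]; exact fun hb => hc2 hb.symm⟩

theorem pvRepKeep (w : List Char) :
    ∀ hw : ∃ c ∈ w, c ≠ ',',
      ∃ c ∈ PySem.Chars.replace w ['.', 't', '.'] ['.', 't'], c ≠ ',' := by
  induction hn : w.length using Nat.strong_induction_on generalizing w with
  | _ n ih =>
  subst hn
  intro hw
  cases w with
  | nil => simp at hw
  | cons c t =>
    by_cases hm : List.isPrefixOf ['.', 't', '.'] (c :: t) = true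
    · rw [pvRep_pos _ _ _ (by simp) hm]
      exact ⟨'.', by simp, by decide⟩
    · rw [pvRep_neg _ _ _ _ (by simp) (Bool.eq_false_iff.mpr hm)]
      by_cases hc : c = ','
      · obtain ⟨d, hd, hd2⟩ := hw
        simp only [List.mem_cons] at hd
        rcases hd with rfl | hd
        · exact absurd hc hd2
        · obtain ⟨e, he, he2⟩ := ih t.length (by simp) t rfl ⟨d, hd, hd2⟩
          exact ⟨e, by simp [he], he2⟩
      · exact ⟨c, by simp, hc⟩

theorem pvAssembleNe (ps : List (List Char)) (body : List Char)
    (h : ps ≠ [] ∨ body ≠ []) : pvAssemble (ps, body) ≠ [] := by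
  rcases h with h | h
  · obtain ⟨q, qs, hq⟩ : ∃ q qs, ps.reverse = q :: qs := by
      cases hq : ps.reverse with
      | nil => exact absurd (by simpa using hq) h
      | cons q qs => exact ⟨q, qs, rfl⟩
    simp [pvAssemble, hq]
  · simp [pvAssemble, h]

theorem pvFlushNe (cur : List Char) (ps : List (List Char)) (body : List Char)
    (h : ps ≠ [] ∨ body ≠ [] ∨ cur ≠ []) :
    (pvFlushB cur ps body).1 ≠ [] ∨ (pvFlushB cur ps body).2 ≠ [] := by
  unfold pvFlushB
  split
  · left; simp
  · rcases h with h | h | h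
    · left; simpa using h
    · right; intro h'; exact h (List.append_eq_nil_iff.mp h').1
    · right; intro h'; exact h (List.append_eq_nil_iff.mp h').2

theorem pvScanNe (s : List Char) :
    ∀ cur ps body, (ps ≠ [] ∨ body ≠ [] ∨ cur ≠ [] ∨ ∃ c ∈ s, c ≠ ',') →
      pvAssemble (pvScanB s cur ps body) ≠ [] := by
  induction s with
  | nil =>
    intro cur ps body h
    show pvAssemble (pvFlushB cur ps body) ≠ []
    have h' : ps ≠ [] ∨ body ≠ [] ∨ cur ≠ [] := by
      rcases h with h | h | h | h
      · exact Or.inl h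
      · exact Or.inr (Or.inl h)
      · exact Or.inr (Or.inr h)
      · simp at h
    have := pvFlushNe cur ps body h'
    rcases this with h2 | h2
    · exact pvAssembleNe _ _ (Or.inl h2)
    · exact pvAssembleNe _ _ (Or.inr h2)
  | cons c s' ih =>
    intro cur ps body h
    by_cases hc1 : c = ','
    · subst hc1
      show pvAssemble (pvScanB s' [] (pvFlushB cur ps body).1 (pvFlushB cur ps body).2) ≠ []
      apply ih
      rcases h with h | h | h | h
      · rcases pvFlushNe cur ps body (Or.inl h) with h2 | h2
        · exact Or.inl h2
        · exact Or.inr (Or.inl h2)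
      · rcases pvFlushNe cur ps body (Or.inr (Or.inl h)) with h2 | h2
        · exact Or.inl h2
        · exact Or.inr (Or.inl h2)
      · rcases pvFlushNe cur ps body (Or.inr (Or.inr h)) with h2 | h2
        · exact Or.inl h2
        · exact Or.inr (Or.inl h2)
      · obtain ⟨d, hd, hd2⟩ := h
        simp only [List.mem_cons] at hd
        rcases hd with rfl | hd
        · exact absurd rfl hd2
        · exact Or.inr (Or.inr (Or.inr ⟨d, hd, hd2⟩))
    · by_cases hc2 : c = '!'
      · subst hc2
        simp only [pvScanB, reduceIte]
        exact ih _ _ _ (Or.inr (Or.inr (Or.inl (by simp))))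
      · by_cases hc3 : c = '.'
        · subst hc3
          simp only [pvScanB, reduceIte]
          exact ih _ _ _ (Or.inr (Or.inr (Or.inl (by simp))))
        · by_cases hc4 : c = ':'
          · subst hc4
            simp only [pvScanB, reduceIte]
            exact ih _ _ _ (Or.inr (Or.inr (Or.inl (by simp))))
          · simp only [pvScanB, if_neg hc1, if_neg hc2, if_neg hc3, if_neg hc4]
            exact ih _ _ _ (Or.inr (Or.inr (Or.inl (by simp))))

theorem pvRepDrop (a : Char) (ha : a ≠ ' ') :
    ∀ r : List Char, PySem.Chars.replace r [a, ' '] [' '] = pvDropB a r := by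
  intro r
  induction hn : r.length using Nat.strong_induction_on generalizing r with
  | _ n ih =>
  subst hn
  cases r with
  | nil => rw [pvRep_nil _ _ (by simp)]; rfl
  | cons c t =>
    by_cases hp : List.isPrefixOf [a, ' '] (c :: t) = true
    · obtain ⟨t', rfl, hca⟩ : ∃ t', t = ' ' :: t' ∧ c = a := by
        cases t with
        | nil => simp [List.isPrefixOf] at hp
        | cons e t' =>
          simp [List.isPrefixOf] at hp
          exact ⟨t', by rw [← hp.2], hp.1.symm⟩
      rw [pvRep_pos _ _ _ (by simp) hp]
      simp only [List.length_cons, List.drop_succ_cons, List.drop_zero]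
      norm_num
      rw [ih t'.length (by simp) t' rfl]
      show _ = pvDropB a (c :: ' ' :: t')
      simp only [pvDropB, List.head?_cons]
      rw [if_pos ⟨hca, trivial⟩, if_neg (fun hcon => ha hcon.1.symm)]
    · rw [pvRep_neg _ _ _ _ (by simp) (Bool.eq_false_iff.mpr hp)]
      rw [ih t.length (by simp) t rfl]
      show _ = pvDropB a (c :: t)
      simp only [pvDropB]
      rw [if_neg]
      intro ⟨h1, h2⟩
      subst h1
      apply hp
      cases t with
      | nil => simp at h2
      | cons e t' =>
        simp only [List.head?_cons, Option.some.injEq] at h2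
        subst h2
        simp [List.isPrefixOf]

theorem pvEndswith_single (r : List Char) (b : Char) :
    PySem.Chars.endswith r [b] = true ↔ r.getLast? = some b := by
  show List.isSuffixOf [b] r = true ↔ _
  rw [List.isSuffixOf_iff_suffix]
  constructor
  · rintro ⟨t, rfl⟩
    simp
  · intro h
    exact ⟨r.dropLast, List.dropLast_append_getLast? b h⟩

-- ===== VERDICT (by name: the statement is the Claim_ definition above) =====
theorem reorder_morphemes_spec : Claim_equal_reorder_morphemes := by
  intro word hdom hpre
  unfold Spec_reorder_morphemes
  rcases hpre with rfl | hpre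
  · decide
  · obtain ⟨c, hc, hcn⟩ := by simpa using hpre
    unfold reorder_morphemes reorder_morphemes_alt
    simp only []
    rw [pvChain, pvSplit_eq]
    have hcons : pvMySplit ((PySem.Chars.replace word.toList ['.', 't', '.'] ['.', 't']).flatMap pvE) =
        pvConsHead [] (pvMySplit ((PySem.Chars.replace word.toList ['.', 't', '.'] ['.', 't']).flatMap pvE)) := by
      cases hM : pvMySplit ((PySem.Chars.replace word.toList ['.', 't', '.'] ['.', 't']).flatMap pvE) with
      | nil => exact absurd hM (pvMySplit_ne_nil _)
      | cons m ms => rw [pvConsHead_cons, List.nil_append]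
    have hfold := pvAfold
      (pvMySplit ((PySem.Chars.replace word.toList ['.', 't', '.'] ['.', 't']).flatMap pvE)) [] []
    rw [show pvAssemble ([], []) = ([] : List Char) from rfl] at hfold
    rw [hfold, hcons, pvMain _ [] [] [] (by simp)]
    rw [pvRepDrop '\'' (by decide), pvRepDrop '·' (by decide)]
    rw [show (List.map (fun p => p ++ ['.'])
          (pvScanB (PySem.Chars.replace word.toList ['.', 't', '.'] ['.', 't']) [] [] []).1.reverse).flatten ++
          (pvScanB (PySem.Chars.replace word.toList ['.', 't', '.'] ['.', 't']) [] [] []).2 =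
        pvAssemble (pvScanB (PySem.Chars.replace word.toList ['.', 't', '.'] ['.', 't']) [] [] []) from rfl]
    have hwne : word.toList ≠ [] := by intro h; rw [h] at hc; simp at hc
    have hR : pvAssemble (pvScanB (PySem.Chars.replace word.toList ['.', 't', '.'] ['.', 't']) [] [] []) ≠ [] := by
      apply pvScanNe
      exact Or.inr (Or.inr (Or.inr (pvRepKeep word.toList ⟨c, hc, hcn⟩)))
    set R := pvAssemble (pvScanB (PySem.Chars.replace word.toList ['.', 't', '.'] ['.', 't']) [] [] []) with hRdef
    have hif : (if word.toList ≠ [] ∧ PySem.List.pyGetD R (-1) ' ' = '·' then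
          PySem.List.slice R none (some (-1)) else R) =
        (if PySem.Chars.endswith R ['·'] = true then PySem.List.slice R none (some (-1)) else R) := by
      by_cases hlast : R.getLast hR = '·'
      · rw [if_pos ⟨hwne, by rw [PySem.List.pyGetD_neg_one R ' ' hR]; exact hlast⟩,
          if_pos ((pvEndswith_single R '·').mpr
            (by rw [List.getLast?_eq_getLast hR]; exact congrArg some hlast))]
      · rw [if_neg (fun hcon => hlast (by rw [← PySem.List.pyGetD_neg_one R ' ' hR]; exact hcon.2)),
          if_neg (fun hcon => hlast (by
            have h2 := (pvEndswith_single R '·').mp hcon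
            rw [List.getLast?_eq_getLast hR] at h2
            exact Option.some.inj h2))]
    rw [hif]
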